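-- pv_equiv track=rewrite | github.com/ichenq/gist | src/py/unity_build.py | find_last_include
-- ===== SOURCE A (Python) =====
-- def find_last_include(text_lines):
--     last_index = 0
--     idx = 0
--     for line in text_lines:
--         if line.startswith('#'):
--             last_index = idx
--         if line.startswith('{'):
--             break
--         idx += 1
--     return last_index + 1
-- ===== SOURCE B (Python) =====
-- def find_last_include(text_lines):
--     # Collect the region before the first '{'-line, then scan it backward
--     prefix = []
--     for line in text_lines:
--         if line.startswith('{'):
--             break
--         prefix.append(line)
--     for i in range(len(prefix) - 1, -1, -1):
--         if prefix[i].startswith('#'):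
--             return i + 1
--     return 1
-- ===== Notes on version B (the rewrite author's own statement) =====
-- stated objective: alternative
-- what changed: Single forward loop carrying last_index/idx counters is replaced by a two-phase decomposition: collect the prefix before the first '{'-line, then scan it backward and return at the first '#'-line.
import Mathlib
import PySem

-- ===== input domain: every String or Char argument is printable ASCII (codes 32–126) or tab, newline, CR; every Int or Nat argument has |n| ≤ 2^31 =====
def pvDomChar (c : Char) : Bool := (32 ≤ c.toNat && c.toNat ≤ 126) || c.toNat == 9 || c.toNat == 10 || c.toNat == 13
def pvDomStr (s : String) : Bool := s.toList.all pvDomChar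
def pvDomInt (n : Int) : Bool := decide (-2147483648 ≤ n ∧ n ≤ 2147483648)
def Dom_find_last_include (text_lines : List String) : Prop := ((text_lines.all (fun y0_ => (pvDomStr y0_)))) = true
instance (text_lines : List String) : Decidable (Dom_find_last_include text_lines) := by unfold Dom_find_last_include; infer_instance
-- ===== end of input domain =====

-- B replaces A's single counter-carrying forward loop by a two-phase decomposition
-- (collect the pre-'{' prefix, then scan it backward for the last '#'-line); alternative, same cost.


-- ===== PORT A =====
-- A's loop: state (last_index, idx); '#' updates last_index, '{' breaks, else idx += 1.
def findLastGo (lines : List String) (last_index idx : Int) : Int :=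
  match lines with
  | [] => last_index + 1
  | line :: rest =>
    let last_index' := if PySem.Str.startswith line "#" then idx else last_index
    if PySem.Str.startswith line "{" then last_index' + 1
    else findLastGo rest last_index' (idx + 1)

def find_last_include (text_lines : List String) : Int :=
  findLastGo text_lines 0 0

-- ===== PORT B =====
-- phase 1: the lines before the first '{'-line
def buildPrefix (lines : List String) : List String :=
  match lines with
  | [] => []
  | line :: rest =>
    if PySem.Str.startswith line "{" then []
    else line :: buildPrefix rest

-- phase 2: for i in range(i-1, -1, -1): if prefix[i].startswith('#'): return i+1; return 1
def scanBack (pfx : List String) : Nat → Int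
  | 0 => 1
  | i + 1 => if PySem.Str.startswith (pfx.getD i "") "#" then (i : Int) + 1 else scanBack pfx i

def find_last_include_alt (text_lines : List String) : Int :=
  let pfx := buildPrefix text_lines
  scanBack pfx pfx.length

-- ===== PRECONDITION & SPEC =====
def Spec_find_last_include (text_lines : List String) (out : Int) : Prop := out = find_last_include_alt text_lines
instance (text_lines : List String) (out : Int) : Decidable (Spec_find_last_include text_lines out) := by unfold Spec_find_last_include; infer_instance

-- ===== CLAIM (what is proved, stated in full; the proofs are below) =====
def Claim_equal_find_last_include : Prop := ∀ (text_lines : List String), Dom_find_last_include text_lines → Spec_find_last_include text_lines (find_last_include text_lines)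

-- ===== LEMMAS AND PROOFS =====

-- index of the last '#'-line, the common characterisation both ports reduce to
def lastHash (lines : List String) : Option Nat :=
  match lines with
  | [] => none
  | line :: rest =>
    match lastHash rest with
    | some j => some (j + 1)
    | none => if PySem.Str.startswith line "#" then some 0 else none

theorem not_startswith_brace_of_hash (l : List Char)
    (h : PySem.Chars.startswith l ['#'] = true) : PySem.Chars.startswith l ['{'] = false := by
  by_contra hb
  rw [Bool.not_eq_false] at hb
  rw [PySem.Chars.startswith_iff] at h hb
  rcases h with ⟨t1, h1⟩
  rcases hb with ⟨t2, h2⟩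
  rw [← h2] at h1
  simp at h1

theorem lastHash_append_singleton (q : List String) (x : String) :
    lastHash (q ++ [x]) =
      if PySem.Str.startswith x "#" then some q.length else lastHash q := by
  induction q with
  | nil => simp [lastHash]
  | cons y ys ih =>
    simp only [List.cons_append, lastHash, ih]
    split_ifs <;> simp

theorem findLastGo_eq (lines : List String) (li idx : Int) :
    findLastGo lines li idx =
      match lastHash (buildPrefix lines) with
      | some j => idx + (j : Int) + 1
      | none => li + 1 := by
  induction lines generalizing li idx with
  | nil => simp [findLastGo, buildPrefix, lastHash]
  | cons line rest ih =>
    by_cases hb : PySem.Chars.startswith line.toList ['{'] = true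
    · have hh : PySem.Chars.startswith line.toList ['#'] = false := by
        by_contra h
        rw [Bool.not_eq_false] at h
        rw [not_startswith_brace_of_hash line.toList h] at hb
        exact Bool.false_ne_true hb
      simp [findLastGo, buildPrefix, hb, hh, lastHash]
    · rw [Bool.not_eq_true] at hb
      have e1 : PySem.Str.startswith line "{" = false := by
        simp [PySem.Str.startswith_eq, hb]
      simp only [findLastGo, buildPrefix, e1, Bool.false_eq_true, if_false]
      rw [ih]
      simp only [lastHash]
      cases hl : lastHash (buildPrefix rest) with
      | some j => push_cast; ring_nf
      | none =>
        by_cases hh : PySem.Str.startswith line "#" = true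
        · simp only [PySem.Str.startswith_eq] at hh
          simp at hh
          simp [hh]
        · simp only [PySem.Str.startswith_eq] at hh
          simp at hh
          simp [hh]

theorem scanBack_eq (p : List String) (i : Nat) (hi : i ≤ p.length) :
    scanBack p i =
      match lastHash (p.take i) with
      | some j => (j : Int) + 1
      | none => 1 := by
  induction i with
  | zero => simp [scanBack, lastHash]
  | succ i ih =>
    have hilt : i < p.length := Nat.lt_of_succ_le hi
    have htake : p.take (i + 1) = p.take i ++ [p[i]] := List.take_succ_eq_append_getElem hilt
    have hgetD : p.getD i "" = p[i] := List.getD_eq_getElem p "" hilt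
    rw [scanBack, hgetD, htake, lastHash_append_singleton]
    have hlen : (p.take i).length = i := List.length_take_of_le (Nat.le_of_lt hilt)
    split_ifs with hh
    · simp [hlen]
    · exact ih (Nat.le_of_lt hilt)

-- ===== VERDICT (by name: the statement is the Claim_ definition above) =====
theorem find_last_include_spec : Claim_equal_find_last_include := by
  intro text_lines _
  unfold Spec_find_last_include find_last_include find_last_include_alt
  rw [findLastGo_eq, scanBack_eq _ _ (le_refl _), List.take_length]
  cases lastHash (buildPrefix text_lines) <;> simp
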